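-- pv_equiv track=rewrite | github.com/nimeshtripathi/ECG-with-Arrythmia-Detection | knn.py | ds_minmax
-- ===== SOURCE A (Python) =====
-- def ds_minmax(ds):
-- 	minmax = list()
-- 	for i in range(len(ds[0])):
-- 		column_val = [row[i] for row in ds]
-- 		value_min = min(column_val)
-- 		value_max = max(column_val)
-- 		minmax.append([value_min, value_max])
-- 	return minmax
-- ===== SOURCE B (Python) =====
-- def ds_minmax(ds):
-- 	mm = [(v, v) for v in ds[0]]
-- 	for row in ds[1:]:
-- 		mm = [(min(lo, row[i]), max(hi, row[i])) for i, (lo, hi) in enumerate(mm)]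
-- 	return [[lo, hi] for lo, hi in mm]
-- ===== Notes on version B (the rewrite author's own statement) =====
-- stated objective: alternative
-- what changed: B makes one row-major pass maintaining running (min,max) pairs per column instead of A's m separate column-wise scans building each column list.
import Mathlib
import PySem

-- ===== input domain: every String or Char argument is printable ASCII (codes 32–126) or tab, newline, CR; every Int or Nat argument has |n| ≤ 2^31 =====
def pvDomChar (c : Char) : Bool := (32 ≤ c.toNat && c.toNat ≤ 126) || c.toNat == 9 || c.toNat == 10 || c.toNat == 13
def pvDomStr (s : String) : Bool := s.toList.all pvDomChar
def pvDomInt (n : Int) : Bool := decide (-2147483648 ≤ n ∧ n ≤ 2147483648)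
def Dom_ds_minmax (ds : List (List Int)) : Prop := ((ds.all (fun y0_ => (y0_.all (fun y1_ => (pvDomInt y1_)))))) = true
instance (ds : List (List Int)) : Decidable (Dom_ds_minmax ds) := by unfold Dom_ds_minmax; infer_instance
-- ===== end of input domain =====

-- B replaces A's m column-wise scans by a single row-major pass maintaining running (min,max) pairs (alternative decomposition, same asymptotic cost).

-- ===== PORT A =====
def ds_minmax (ds : List (List Int)) : List (List Int) :=
  (PySem.List.pyRange 0 ((PySem.List.pyGetD ds 0 []).length : Int) 1).foldl
    (fun minmax i =>
      let column_val := ds.map (fun row => PySem.List.pyGetD row i 0)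
      let value_min := (PySem.List.min? column_val (fun x => x)).getD 0
      let value_max := (PySem.List.max? column_val (fun x => x)).getD 0
      minmax ++ [[value_min, value_max]]) []

-- B-side helper: the per-row update of the running (min,max) pairs
def pvStep (mm : List (Int × Int)) (row : List Int) : List (Int × Int) :=
  (PySem.List.enumerate mm 0).map (fun p =>
    (min p.2.1 (PySem.List.pyGetD row p.1 0), max p.2.2 (PySem.List.pyGetD row p.1 0)))

-- ===== PORT B =====
def ds_minmax_alt (ds : List (List Int)) : List (List Int) :=
  let mm0 := (PySem.List.pyGetD ds 0 []).map (fun v => (v, v))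
  let mm := (PySem.List.slice ds (some 1) none).foldl pvStep mm0
  mm.map (fun p => [p.1, p.2])

-- ===== PRECONDITION & SPEC =====
-- Pre_ excludes exactly the inputs where Python A raises IndexError: empty ds (ds[0]),
-- and ragged data where some row is shorter than the first row (row[i]).
def Pre_ds_minmax (ds : List (List Int)) : Prop :=
  ds ≠ [] ∧ ∀ row ∈ ds, (ds.headD []).length ≤ row.length
instance (ds : List (List Int)) : Decidable (Pre_ds_minmax ds) := by unfold Pre_ds_minmax; infer_instance
def pvWitness_ds_minmax : List (List Int) := [[1, 5, 3], [4, 2, 6]]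

def Spec_ds_minmax (ds : List (List Int)) (out : List (List Int)) : Prop := out = ds_minmax_alt ds
instance (ds : List (List Int)) (out : List (List Int)) : Decidable (Spec_ds_minmax ds out) := by unfold Spec_ds_minmax; infer_instance

-- ===== CLAIM (what is proved, stated in full; the proofs are below) =====
def Claim_equal_ds_minmax : Prop := ∀ (ds : List (List Int)), Dom_ds_minmax ds → Pre_ds_minmax ds → Spec_ds_minmax ds (ds_minmax ds)

-- ===== LEMMAS AND PROOFS =====

lemma pvStep_length (mm : List (Int × Int)) (row : List Int) :
    (pvStep mm row).length = mm.length := by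
  simp [pvStep, PySem.List.length_enumerate]

lemma pvStep_getElem (mm : List (Int × Int)) (row : List Int) (k : Nat) (hk : k < mm.length) :
    (pvStep mm row)[k]'(by simp [pvStep_length, hk]) =
      (min mm[k].1 (row.getD k 0), max mm[k].2 (row.getD k 0)) := by
  simp [pvStep, PySem.List.getElem_enumerate]

lemma pvFold_length (rs : List (List Int)) (mm : List (Int × Int)) :
    (rs.foldl pvStep mm).length = mm.length := by
  induction rs generalizing mm with
  | nil => rfl
  | cons r rs ih => simp [List.foldl_cons, ih, pvStep_length]

lemma pvFold_getElem (rs : List (List Int)) (mm : List (Int × Int)) (k : Nat) (hk : k < mm.length) :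
    (rs.foldl pvStep mm)[k]'(by simp [pvFold_length, hk]) =
      (rs.foldl (fun a row => min a (row.getD k 0)) mm[k].1,
       rs.foldl (fun a row => max a (row.getD k 0)) mm[k].2) := by
  induction rs generalizing mm with
  | nil => rfl
  | cons r rs ih =>
    have hk' : k < (pvStep mm r).length := by simp [pvStep_length, hk]
    simp only [List.foldl_cons]
    rw [ih (pvStep mm r) hk', pvStep_getElem mm r k hk]

theorem ds_minmax_spec_main (ds : List (List Int)) (_ : Dom_ds_minmax ds)
    (_ : Pre_ds_minmax ds) : ds_minmax ds = ds_minmax_alt ds := by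
  cases ds with
  | nil => rfl
  | cons r0 rest =>
    show ds_minmax (r0 :: rest) = ds_minmax_alt (r0 :: rest)
    unfold ds_minmax ds_minmax_alt
    rw [PySem.List.foldl_append_singleton_eq_map]
    rw [PySem.List.slice_from_one]
    simp only [PySem.List.pyGetD_zero_cons, List.tail_cons, List.nil_append]
    -- both sides are lists of length r0.length; compare elementwise
    have hlenB : ((rest.foldl pvStep (r0.map (fun v => (v, v)))).map
        (fun p => [p.1, p.2])).length = r0.length := by
      simp [pvFold_length]
    apply List.ext_getElem
    · simp [PySem.List.length_pyRange_one, pvFold_length]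
    
    · intro k h1 h2
      have hk : k < r0.length := by
        simpa [PySem.List.length_pyRange_one] using h1
      have hmm : k < (r0.map (fun v => (v, v))).length := by simpa using hk
      rw [List.getElem_map, PySem.List.getElem_pyRange_one]
      rw [List.getElem_map]
      rw [pvFold_getElem rest (r0.map (fun v => (v, v))) k hmm]
      simp only [List.getElem_map]
      have hcol : ((r0 :: rest).map (fun row => PySem.List.pyGetD row (0 + (k : Int)) 0)) =
          r0[k] :: rest.map (fun row => row.getD k 0) := by
        simp [PySem.List.pyGetD_natCast, List.getD_eq_getElem?_getD, hk]
      rw [hcol, PySem.List.min?_id_cons, PySem.List.max?_id_cons]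
      simp only [Option.getD_some]
      congr 1
      · rw [List.foldl_map]
      · rw [List.foldl_map]

-- ===== VERDICT (by name: the statement is the Claim_ definition above) =====
theorem ds_minmax_spec : Claim_equal_ds_minmax := by
  intro ds hdom hpre
  exact ds_minmax_spec_main ds hdom hpre
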